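-- pv_equiv track=rewrite | github.com/mentalblood0/drunk_snail | template_engine_c.py | fixIndent
-- ===== SOURCE A (Python) =====
-- def fixIndent(lines_without_semicolon, initial_indent=0):
-- 	result = []
-- 	current_indent = initial_indent
-- 	for line in lines_without_semicolon:
-- 		if line.endswith('}'):
-- 			current_indent -= 1
-- 			result.append('\t' * current_indent + line)
-- 		elif line.endswith('{'):
-- 			result.append('\t' * current_indent + line)
-- 			current_indent += 1
-- 		else:
-- 			result.append('\t' * current_indent + line)
-- 	return result
-- ===== SOURCE B (Python) =====
-- def fixIndent(lines_without_semicolon, initial_indent=0):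
-- 	deltas = [(-1 if l.endswith('}') else (1 if l.endswith('{') else 0)) for l in lines_without_semicolon]
-- 	entering = [initial_indent]
-- 	for d in deltas:
-- 		entering.append(entering[-1] + d)
-- 	return ['\t' * (e + min(d, 0)) + l for l, d, e in zip(lines_without_semicolon, deltas, entering)]
-- ===== Notes on version B (the rewrite author's own statement) =====
-- stated objective: alternative
-- what changed: Replaced A's single stateful loop (running indent mutated per line) by a per-line delta list, a prefix-sum pass giving the indent entering each line, and a separate zip/comprehension formatting pass.
import Mathlib
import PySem

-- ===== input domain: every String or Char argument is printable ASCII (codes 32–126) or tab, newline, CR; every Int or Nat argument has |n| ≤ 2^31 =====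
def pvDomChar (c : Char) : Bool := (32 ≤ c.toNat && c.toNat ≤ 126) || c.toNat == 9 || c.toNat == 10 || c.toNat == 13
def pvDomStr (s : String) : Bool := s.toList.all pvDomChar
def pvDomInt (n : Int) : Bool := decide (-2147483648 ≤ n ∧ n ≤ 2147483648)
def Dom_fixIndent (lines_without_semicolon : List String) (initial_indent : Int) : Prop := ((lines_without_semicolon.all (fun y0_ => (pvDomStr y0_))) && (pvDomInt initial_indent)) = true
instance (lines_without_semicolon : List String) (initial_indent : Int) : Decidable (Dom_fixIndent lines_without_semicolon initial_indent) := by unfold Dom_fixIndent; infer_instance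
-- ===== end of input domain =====

-- B replaces A's single stateful loop by a delta list + prefix-sum table and a separate formatting pass (objective: alternative decomposition, same cost).

-- shared rendering of '\t' * k + line (both Pythons build exactly this string)
def pvLine (k : Int) (line : String) : String :=
  String.ofList (PySem.List.pyRepeat ['\t'] k ++ line.toList)

-- ===== PORT A =====
def fixIndent (lines_without_semicolon : List String) (initial_indent : Int) : List String :=
  (lines_without_semicolon.foldl
    (fun (st : List String × Int) line =>
      if PySem.Str.endswith line "}" then
        (st.1 ++ [pvLine (st.2 - 1) line], st.2 - 1)
      else if PySem.Str.endswith line "{" then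
        (st.1 ++ [pvLine st.2 line], st.2 + 1)
      else
        (st.1 ++ [pvLine st.2 line], st.2))
    ([], initial_indent)).1

-- ===== PORT B =====
def pvDelta (line : String) : Int :=
  if PySem.Str.endswith line "}" then -1
  else if PySem.Str.endswith line "{" then 1
  else 0

def fixIndent_alt (lines_without_semicolon : List String) (initial_indent : Int) : List String :=
  let deltas := lines_without_semicolon.map pvDelta
  let entering := deltas.foldl (fun acc d => acc ++ [acc.getLast! + d]) [initial_indent]
  (lines_without_semicolon.zip (deltas.zip entering)).map
    (fun p => pvLine (p.2.2 + min p.2.1 0) p.1)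

-- ===== PRECONDITION & SPEC =====
def Spec_fixIndent (lines_without_semicolon : List String) (initial_indent : Int) (out : List String) : Prop := out = fixIndent_alt lines_without_semicolon initial_indent
instance (lines_without_semicolon : List String) (initial_indent : Int) (out : List String) : Decidable (Spec_fixIndent lines_without_semicolon initial_indent out) := by unfold Spec_fixIndent; infer_instance

-- ===== CLAIM (what is proved, stated in full; the proofs are below) =====
def Claim_equal_fixIndent : Prop := ∀ (lines_without_semicolon : List String) (initial_indent : Int), Dom_fixIndent lines_without_semicolon initial_indent → Spec_fixIndent lines_without_semicolon initial_indent (fixIndent lines_without_semicolon initial_indent)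

-- ===== LEMMAS AND PROOFS =====

-- reference recursion both ports are reduced to
def pvGo : List String → Int → List String
  | [], _ => []
  | l :: ls, i => pvLine (i + min (pvDelta l) 0) l :: pvGo ls (i + pvDelta l)

-- prefix-sum scan matching pvGo's indent thread
def pvScan : Int → List Int → List Int
  | _, [] => []
  | i, d :: ds => (i + d) :: pvScan (i + d) ds

lemma foldl_entering (ds : List Int) (acc : List Int) (x : Int) (h : acc.getLast? = some x) :
    ds.foldl (fun a d => a ++ [a.getLast! + d]) acc = acc ++ pvScan x ds := by
  induction ds generalizing acc x with
  | nil => simp [pvScan]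
  | cons d ds ih =>
      simp only [List.foldl_cons, pvScan]
      have hx : acc.getLast! = x := by
        cases acc with
        | nil => simp at h
        | cons a t =>
            rw [List.getLast?_eq_some_getLast (by simp)] at h
            simpa [List.getLast!] using h
      rw [hx, ih (acc ++ [x + d]) (x + d) (by simp)]
      simp

lemma zip_scan_go (ls : List String) (i : Int) :
    (ls.zip ((ls.map pvDelta).zip (i :: pvScan i (ls.map pvDelta)))).map
      (fun p => pvLine (p.2.2 + min p.2.1 0) p.1) = pvGo ls i := by
  induction ls generalizing i with
  | nil => simp [pvGo]
  | cons l t ih =>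
      simp only [List.map_cons, pvScan, List.zip_cons_cons, pvGo, List.cons.injEq]
      exact ⟨trivial, ih (i + pvDelta l)⟩

lemma alt_eq_go (ls : List String) (i : Int) : fixIndent_alt ls i = pvGo ls i := by
  unfold fixIndent_alt
  show (ls.zip ((ls.map pvDelta).zip
      ((ls.map pvDelta).foldl (fun acc d => acc ++ [acc.getLast! + d]) [i]))).map
      (fun p => pvLine (p.2.2 + min p.2.1 0) p.1) = pvGo ls i
  rw [foldl_entering (ls.map pvDelta) [i] i (by simp)]
  simpa using zip_scan_go ls i

lemma a_eq_go (ls : List String) (acc : List String) (i : Int) :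
    (ls.foldl
      (fun (st : List String × Int) line =>
        if PySem.Str.endswith line "}" then
          (st.1 ++ [pvLine (st.2 - 1) line], st.2 - 1)
        else if PySem.Str.endswith line "{" then
          (st.1 ++ [pvLine st.2 line], st.2 + 1)
        else
          (st.1 ++ [pvLine st.2 line], st.2))
      (acc, i)).1 = acc ++ pvGo ls i := by
  induction ls generalizing acc i with
  | nil => simp [pvGo]
  | cons l ls ih =>
      simp only [List.foldl_cons, pvGo, pvDelta]
      by_cases h1 : PySem.Str.endswith l "}"
      · simp only [h1, if_true, ih]
        have h2 : i + (-1 : Int) = i - 1 := by omega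
        simp [h2]
      · by_cases h2 : PySem.Str.endswith l "{"
        · simp only [h1, h2, if_true, if_false, Bool.false_eq_true, ih]
          simp
        · simp only [h1, h2, if_false, Bool.false_eq_true, ih]
          simp

-- ===== VERDICT (by name: the statement is the Claim_ definition above) =====
theorem fixIndent_spec : Claim_equal_fixIndent := by
  intro ls i _
  unfold Spec_fixIndent fixIndent
  rw [a_eq_go, alt_eq_go]
  simp
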